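-- pv_equiv track=rewrite | github.com/YLdz-SM/ChromSeq | ChromSeq/src/enhanced_utils.py | find_low_quality_regions
-- ===== SOURCE A (Python) =====
-- def find_low_quality_regions(quality_scores, threshold=20, min_length=5):
--     """Find regions with consistently low quality scores"""
--     low_quality_regions = []
--     in_region = False
--     region_start = 0
--
--     for i, score in enumerate(quality_scores):
--         if score < threshold:
--             if not in_region:
--                 in_region = True
--                 region_start = i
--         else:
--             if in_region:
--                 region_length = i - region_start
--                 if region_length >= min_length:
--                     low_quality_regions.append((region_start, i-1))
--                 in_region = False
--
--     # Handle case where sequence ends in low quality region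
--     if in_region:
--         region_length = len(quality_scores) - region_start
--         if region_length >= min_length:
--             low_quality_regions.append((region_start, len(quality_scores)-1))
--
--     return low_quality_regions
-- ===== SOURCE B (Python) =====
-- def find_low_quality_regions(quality_scores, threshold=20, min_length=5):
--     """Find regions with consistently low quality scores"""
--     low = [s < threshold for s in quality_scores]
--     n = len(low)
--     starts = [i for i in range(n) if low[i] and (i == 0 or not low[i-1])]
--     ends = [i for i in range(n) if low[i] and (i == n-1 or not low[i+1])]
--     return [(s, e) for s, e in zip(starts, ends) if e - s + 1 >= min_length]
-- ===== Notes on version B (the rewrite author's own statement) =====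
-- stated objective: alternative
-- what changed: Replaces A's single-pass in_region/region_start state machine (with end-of-sequence fixup) by staged passes: a boolean low-mask, boundary detection of run starts and run ends by comparing each index with its neighbour, then zipping start/end lists and filtering by length.
import Mathlib
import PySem

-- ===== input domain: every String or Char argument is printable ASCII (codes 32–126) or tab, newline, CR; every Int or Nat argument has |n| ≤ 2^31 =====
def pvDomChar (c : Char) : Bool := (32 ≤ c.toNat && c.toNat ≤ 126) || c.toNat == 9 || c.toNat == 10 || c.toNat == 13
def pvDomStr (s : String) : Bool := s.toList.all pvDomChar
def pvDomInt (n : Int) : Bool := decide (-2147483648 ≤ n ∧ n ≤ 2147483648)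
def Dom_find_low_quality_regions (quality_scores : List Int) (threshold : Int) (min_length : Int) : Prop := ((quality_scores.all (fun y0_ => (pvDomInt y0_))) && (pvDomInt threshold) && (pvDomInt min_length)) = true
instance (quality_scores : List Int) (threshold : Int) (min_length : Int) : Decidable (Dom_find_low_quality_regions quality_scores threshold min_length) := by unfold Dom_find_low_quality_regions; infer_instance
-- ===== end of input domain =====

-- B replaces A's single-pass in_region/region_start state machine by staged passes:
-- a boolean low-mask, neighbour-comparison detection of run starts and run ends,
-- then zip + length filter (objective: alternative; same O(n) cost).

-- ===== PORT A =====
-- one loop step of A: state = (low_quality_regions, in_region, region_start), p = (i, score)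
def flqrStep (threshold min_length : Int) (s : List (Int × Int) × Bool × Int) (p : Int × Int) :
    List (Int × Int) × Bool × Int :=
  if p.2 < threshold then
    if s.2.1 = false then (s.1, true, p.1) else s
  else
    if s.2.1 then
      ((if p.1 - s.2.2 ≥ min_length then s.1 ++ [(s.2.2, p.1 - 1)] else s.1), false, s.2.2)
    else s

-- A's trailing "sequence ends in low quality region" block; n = len(quality_scores)
def flqrFin (min_length n : Int) (st : List (Int × Int) × Bool × Int) : List (Int × Int) :=
  if st.2.1 then
    if n - st.2.2 ≥ min_length then st.1 ++ [(st.2.2, n - 1)] else st.1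
  else st.1

def find_low_quality_regions (quality_scores : List Int) (threshold : Int) (min_length : Int) :
    List (Int × Int) :=
  flqrFin min_length (quality_scores.length : Int)
    ((PySem.List.enumerate quality_scores 0).foldl (flqrStep threshold min_length) ([], false, 0))

-- ===== PORT B =====
-- low = [s < threshold for s in quality_scores]
def flqrMask (threshold : Int) (qs : List Int) : List Bool := qs.map (fun s => decide (s < threshold))

-- starts = [i for i in range(n) if low[i] and (i == 0 or not low[i-1])]
def flqrStarts (low : List Bool) : List Nat :=
  (List.range low.length).filter (fun i => low.getD i false && (i == 0 || !(low.getD (i - 1) false)))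

-- ends = [i for i in range(n) if low[i] and (i == n-1 or not low[i+1])]
def flqrEnds (low : List Bool) : List Nat :=
  (List.range low.length).filter
    (fun i => low.getD i false && (i == low.length - 1 || !(low.getD (i + 1) false)))

-- return [(s, e) for s, e in zip(starts, ends) if e - s + 1 >= min_length]
def find_low_quality_regions_alt (quality_scores : List Int) (threshold : Int) (min_length : Int) :
    List (Int × Int) :=
  (((flqrStarts (flqrMask threshold quality_scores)).zip
      (flqrEnds (flqrMask threshold quality_scores))).filter
    (fun p => decide ((p.2 : Int) - (p.1 : Int) + 1 ≥ min_length))).map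
    (fun p => ((p.1 : Int), (p.2 : Int)))

-- ===== PRECONDITION & SPEC =====
def Spec_find_low_quality_regions (quality_scores : List Int) (threshold : Int) (min_length : Int) (out : List (Int × Int)) : Prop := out = find_low_quality_regions_alt quality_scores threshold min_length
instance (quality_scores : List Int) (threshold : Int) (min_length : Int) (out : List (Int × Int)) : Decidable (Spec_find_low_quality_regions quality_scores threshold min_length out) := by unfold Spec_find_low_quality_regions; infer_instance

-- ===== CLAIM (what is proved, stated in full; the proofs are below) =====
def Claim_equal_find_low_quality_regions : Prop := ∀ (quality_scores : List Int) (threshold : Int) (min_length : Int), Dom_find_low_quality_regions quality_scores threshold min_length → Spec_find_low_quality_regions quality_scores threshold min_length (find_low_quality_regions quality_scores threshold min_length)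

-- ===== LEMMAS AND PROOFS =====

-- the maximal runs of qs relative to threshold t, as (is_low, length) pairs
def flqrGroups (threshold : Int) : List Int → List (Bool × Nat)
  | [] => []
  | x :: xs =>
    (decide (x < threshold),
      (List.takeWhile (fun s => decide (s < threshold) == decide (x < threshold)) (x :: xs)).length)
      :: flqrGroups threshold
          (List.dropWhile (fun s => decide (s < threshold) == decide (x < threshold)) (x :: xs))
termination_by l => l.length
decreasing_by
  simp only [List.dropWhile_cons, beq_self_eq_true, if_true]
  exact Nat.lt_succ_of_le (List.length_dropWhile_le _ _)

-- the regions emitted from the run list, starting at index i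
def flqrEmit (min_length : Int) (i : Int) : List (Bool × Nat) → List (Int × Int)
  | [] => []
  | g :: gs =>
    (if g.1 ∧ (g.2 : Int) ≥ min_length then [(i, i + (g.2 : Int) - 1)] else [])
      ++ flqrEmit min_length (i + (g.2 : Int)) gs

-- B's filter+map over the zipped (start, end) pairs, with offset i
def flqrOut (m : Int) (i : Int) (ps : List (Nat × Nat)) : List (Int × Int) :=
  (ps.filter (fun p => decide ((p.2 : Int) - (p.1 : Int) + 1 ≥ m))).map
    (fun p => (i + (p.1 : Int), i + (p.2 : Int)))

lemma flqrLowRun (t m : Int) : ∀ (l : List Int), (∀ s ∈ l, s < t) →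
    ∀ (i : Int) (acc : List (Int × Int)) (r : Int),
    (PySem.List.enumerate l i).foldl (flqrStep t m) (acc, true, r) = (acc, true, r) := by
  intro l
  induction l with
  | nil => intro _ i acc r; simp [PySem.List.enumerate_nil]
  | cons x xs ih =>
    intro h i acc r
    have hx : x < t := h x (List.mem_cons_self)
    simp only [PySem.List.enumerate_cons, List.foldl_cons]
    have : flqrStep t m (acc, true, r) (i, x) = (acc, true, r) := by
      simp [flqrStep, hx]
    rw [this, ih (fun s hs => h s (List.mem_cons_of_mem _ hs))]

lemma flqrHighRun (t m : Int) : ∀ (l : List Int), (∀ s ∈ l, ¬ s < t) →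
    ∀ (i : Int) (acc : List (Int × Int)) (r : Int),
    (PySem.List.enumerate l i).foldl (flqrStep t m) (acc, false, r) = (acc, false, r) := by
  intro l
  induction l with
  | nil => intro _ i acc r; simp [PySem.List.enumerate_nil]
  | cons x xs ih =>
    intro h i acc r
    have hx : ¬ x < t := h x (List.mem_cons_self)
    simp only [PySem.List.enumerate_cons, List.foldl_cons]
    have : flqrStep t m (acc, false, r) (i, x) = (acc, false, r) := by
      simp [flqrStep, hx]
    rw [this, ih (fun s hs => h s (List.mem_cons_of_mem _ hs))]

lemma flqr_dropWhile_head_false {a : Type} (p : a -> Bool) :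
    forall (l : List a) (y : a) (ys : List a), l.dropWhile p = y :: ys -> p y = false := by
  intro l
  induction l with
  | nil => intro y ys h; simp [List.dropWhile] at h
  | cons b l ih =>
    intro y ys h
    by_cases hb : p b
    . rw [List.dropWhile_cons_of_pos hb] at h; exact ih y ys h
    . rw [List.dropWhile_cons_of_neg hb] at h
      cases h
      simpa using hb

lemma flqrMain (t m : Int) : ∀ (n : Nat) (qs : List Int), qs.length ≤ n →
    ∀ (i : Int) (acc : List (Int × Int)) (r : Int),
    flqrFin m (i + (qs.length : Int))
        ((PySem.List.enumerate qs i).foldl (flqrStep t m) (acc, false, r))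
    = acc ++ flqrEmit m i (flqrGroups t qs) := by
  intro n
  induction n with
  | zero =>
    intro qs hq i acc r
    have : qs = [] := List.length_eq_zero_iff.mp (Nat.le_zero.mp hq)
    subst this
    simp [PySem.List.enumerate_nil, flqrFin, flqrGroups, flqrEmit]
  | succ n ih =>
    intro qs hq i acc r
    match qs with
    | [] => simp [PySem.List.enumerate_nil, flqrFin, flqrGroups, flqrEmit]
    | x :: xs =>
      have hpx : (fun s => decide (s < t) == decide (x < t)) x = true := by simp
      have hsplit : List.takeWhile (fun s => decide (s < t) == decide (x < t)) (x :: xs)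
          ++ List.dropWhile (fun s => decide (s < t) == decide (x < t)) (x :: xs) = x :: xs :=
        List.takeWhile_append_dropWhile
      have hrestlen : (List.dropWhile (fun s => decide (s < t) == decide (x < t)) (x :: xs)).length ≤ n := by
        have hdrop : List.dropWhile (fun s => decide (s < t) == decide (x < t)) (x :: xs)
            = List.dropWhile (fun s => decide (s < t) == decide (x < t)) xs := by
          simp
        rw [hdrop]
        exact le_trans (List.length_dropWhile_le _ _) (Nat.le_of_succ_le_succ hq)
      set p : Int → Bool := fun s => decide (s < t) == decide (x < t) with hp
      set run := List.takeWhile p (x :: xs) with hrun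
      set rest := List.dropWhile p (x :: xs) with hrest
      have hgroups : flqrGroups t (x :: xs) = (decide (x < t), run.length) :: flqrGroups t rest := by
        rw [flqrGroups]
      have hlen : (x :: xs).length = run.length + rest.length := by
        rw [← hsplit, List.length_append]
      have henum : PySem.List.enumerate (x :: xs) i
          = PySem.List.enumerate run i ++ PySem.List.enumerate rest (i + (run.length : Int)) := by
        conv_lhs => rw [← hsplit]
        exact PySem.List.enumerate_append _ _ _
      by_cases hk : x < t
      · -- low-quality run
        have hrun_cons : run = x :: List.takeWhile p xs := by
          rw [hrun, List.takeWhile_cons_of_pos hpx]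
        have hlo : ∀ s ∈ List.takeWhile p xs, s < t := by
          intro s hs
          have := List.mem_takeWhile_imp hs
          simp [hp, hk] at this
          exact this
        have hstep1 : flqrStep t m (acc, false, r) (i, x) = (acc, true, i) := by
          simp [flqrStep, hk]
        have hfoldrun : (PySem.List.enumerate run i).foldl (flqrStep t m) (acc, false, r)
            = (acc, true, i) := by
          rw [hrun_cons, PySem.List.enumerate_cons, List.foldl_cons, hstep1,
            flqrLowRun t m _ hlo]
        rw [henum, List.foldl_append, hfoldrun, hgroups]
        match hr : rest with
        | [] =>
          simp only [PySem.List.enumerate_nil, List.foldl_nil, flqrEmit, flqrFin]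
          have hlen2 : (x :: xs).length = run.length := by simp [hlen]
          rw [hlen2]
          have hcond : (i + (run.length : Int) - i ≥ m) ↔ ((run.length : Int) ≥ m) := by omega
          by_cases hm : (run.length : Int) ≥ m
          · simp [hm, hk, flqrGroups, flqrEmit]
          · simp [hm, hk, flqrGroups, flqrEmit]
        | y :: ys =>
          have hpy : p y = false := flqr_dropWhile_head_false p _ y ys hrest.symm
          have hylt : ¬ y < t := by
            simp [hp, hk] at hpy
            omega
          set acc' := if i + (run.length : Int) - i ≥ m
              then acc ++ [(i, i + (run.length : Int) - 1)] else acc with hacc'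
          have hstepy : flqrStep t m (acc, true, i) (i + (run.length : Int), y)
              = (acc', false, i) := by
            simp [flqrStep, hylt, hacc']
          have hstepy' : flqrStep t m (acc', false, i) (i + (run.length : Int), y)
              = (acc', false, i) := by
            simp [flqrStep, hylt]
          have hswap : (PySem.List.enumerate (y :: ys) (i + (run.length : Int))).foldl
                (flqrStep t m) (acc, true, i)
              = (PySem.List.enumerate (y :: ys) (i + (run.length : Int))).foldl
                (flqrStep t m) (acc', false, i) := by
            rw [PySem.List.enumerate_cons, List.foldl_cons, List.foldl_cons, hstepy, hstepy']
          rw [hswap]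
          have hfin : i + ((x :: xs).length : Int)
              = (i + (run.length : Int)) + ((y :: ys).length : Int) := by
            rw [hlen]; push_cast; ring
          rw [hfin, ih (y :: ys) (hr ▸ hrestlen) (i + (run.length : Int)) acc' i]
          simp only [flqrEmit]
          have hcond : (i + (run.length : Int) - i ≥ m) ↔ ((run.length : Int) ≥ m) := by omega
          by_cases hm : (run.length : Int) ≥ m
          · simp [hacc', hm, hk, List.append_assoc]
          · simp [hacc', hm, hk]
      · -- high-quality run
        have hhi : ∀ s ∈ run, ¬ s < t := by
          intro s hs
          have := List.mem_takeWhile_imp hs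
          simp [hp, hk] at this
          omega
        have hfoldrun : (PySem.List.enumerate run i).foldl (flqrStep t m) (acc, false, r)
            = (acc, false, r) := flqrHighRun t m _ hhi _ _ _
        have hfin : i + ((x :: xs).length : Int)
            = (i + (run.length : Int)) + (rest.length : Int) := by
          rw [hlen]; push_cast; ring
        rw [henum, List.foldl_append, hfoldrun, hfin,
          ih rest hrestlen (i + (run.length : Int)) acc r, hgroups]
        simp [flqrEmit, hk]

lemma flqr_getD_left (k : Nat) (b : Bool) (rest : List Bool) (i : Nat) (h : i < k) :
    (List.replicate k b ++ rest).getD i false = b := by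
  simp [List.getD, List.getElem?_append_left (by simpa using h : i < (List.replicate k b).length), h]

lemma flqr_getD_right (k : Nat) (b : Bool) (rest : List Bool) (j : Nat) :
    (List.replicate k b ++ rest).getD (k + j) false = rest.getD j false := by
  simp [List.getD, List.getElem?_append_right (by simp : (List.replicate k b).length ≤ k + j)]

lemma flqrStarts_true (k : Nat) (rest : List Bool) (hk : 0 < k)
    (h : rest.getD 0 false = false) :
    flqrStarts (List.replicate k true ++ rest) = 0 :: (flqrStarts rest).map (k + ·) := by
  obtain ⟨k', rfl⟩ : ∃ k', k = k' + 1 := ⟨k - 1, by omega⟩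
  unfold flqrStarts
  rw [show (List.replicate (k'+1) true ++ rest).length = (k'+1) + rest.length by simp,
    List.range_add, List.filter_append, List.range_succ_eq_map, List.filter_cons]
  rw [List.filter_map, List.filter_map]
  rw [if_pos (by simp)]
  have h1 : (List.range k').filter
      ((fun i => (List.replicate (k'+1) true ++ rest).getD i false
        && (i == 0 || !((List.replicate (k'+1) true ++ rest).getD (i-1) false))) ∘ Nat.succ) = [] := by
    rw [List.filter_eq_nil_iff]
    intro j hj
    have hj' : j < k' := List.mem_range.mp hj
    simp only [Function.comp_apply, Nat.succ_eq_add_one]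
    rw [flqr_getD_left (k'+1) true rest (j+1) (by omega), show j+1-1 = j from rfl,
      flqr_getD_left (k'+1) true rest j (by omega)]
    simp
  rw [h1, List.map_nil, List.singleton_append]
  congr 1
  congr 1
  apply List.filter_congr
  intro j hj
  simp only [Function.comp_apply]
  rcases j with _ | j'
  · have e1 := flqr_getD_right (k'+1) true rest 0
    have e2 := flqr_getD_left (k'+1) true rest k' (by omega)
    simp only [Nat.add_zero] at e1 ⊢
    rw [show k'+1-1 = k' from rfl, e1, e2, h]
    simp
  · have e1 := flqr_getD_right (k'+1) true rest (j'+1)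
    have e2 := flqr_getD_right (k'+1) true rest j'
    rw [show k'+1+(j'+1)-1 = k'+1+j' by omega, e1, e2,
      beq_eq_false_iff_ne.mpr (by omega : k'+1+(j'+1) ≠ 0),
      beq_eq_false_iff_ne.mpr (by omega : j'+1 ≠ 0)]
    simp

lemma flqrEnds_true (k : Nat) (rest : List Bool) (hk : 0 < k)
    (h : rest.getD 0 false = false) :
    flqrEnds (List.replicate k true ++ rest) = (k - 1) :: (flqrEnds rest).map (k + ·) := by
  obtain ⟨k', rfl⟩ : ∃ k', k = k' + 1 := ⟨k - 1, by omega⟩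
  unfold flqrEnds
  rw [show (List.replicate (k'+1) true ++ rest).length = (k'+1) + rest.length by simp,
    show (k'+1) + rest.length - 1 = k' + rest.length by omega,
    List.range_add, List.filter_append, List.range_succ, List.filter_append, List.filter_map]
  have hA1 : (List.range k').filter
      (fun i => (List.replicate (k'+1) true ++ rest).getD i false
        && (i == k' + rest.length || !((List.replicate (k'+1) true ++ rest).getD (i+1) false))) = [] := by
    rw [List.filter_eq_nil_iff]
    intro i hi
    have hi' : i < k' := List.mem_range.mp hi
    rw [flqr_getD_left (k'+1) true rest i (by omega),
      flqr_getD_left (k'+1) true rest (i+1) (by omega),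
      beq_eq_false_iff_ne.mpr (by omega : i ≠ k' + rest.length)]
    simp
  have hA2 : [k'].filter
      (fun i => (List.replicate (k'+1) true ++ rest).getD i false
        && (i == k' + rest.length || !((List.replicate (k'+1) true ++ rest).getD (i+1) false))) = [k'] := by
    simp only [List.filter_cons, List.filter_nil]
    rw [if_pos ?_]
    have e1 := flqr_getD_right (k'+1) true rest 0
    simp only [Nat.add_zero] at e1
    rw [flqr_getD_left (k'+1) true rest k' (by omega), e1, h]
    simp
  rw [hA1, hA2, List.nil_append, List.singleton_append,
    show (k'+1) - 1 = k' from rfl]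
  congr 1
  congr 1
  apply List.filter_congr
  intro j hj
  have hjL : j < rest.length := List.mem_range.mp hj
  simp only [Function.comp_apply]
  have e1 := flqr_getD_right (k'+1) true rest (j+1)
  rw [show k'+1+j+1 = k'+1+(j+1) by omega, e1, flqr_getD_right (k'+1) true rest j]
  by_cases hj0 : j = rest.length - 1
  · rw [beq_iff_eq.mpr (by omega : k'+1+j = k' + rest.length),
      beq_iff_eq.mpr (by omega : j = rest.length - 1)]
  · rw [beq_eq_false_iff_ne.mpr (by omega : k'+1+j ≠ k' + rest.length),
      beq_eq_false_iff_ne.mpr (by omega : j ≠ rest.length - 1)]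

lemma flqrStarts_false (k : Nat) (rest : List Bool) (hk : 0 < k) :
    flqrStarts (List.replicate k false ++ rest) = (flqrStarts rest).map (k + ·) := by
  obtain ⟨k', rfl⟩ : ∃ k', k = k' + 1 := ⟨k - 1, by omega⟩
  unfold flqrStarts
  rw [show (List.replicate (k'+1) false ++ rest).length = (k'+1) + rest.length by simp,
    List.range_add, List.filter_append, List.filter_map]
  have hA : (List.range (k'+1)).filter
      (fun i => (List.replicate (k'+1) false ++ rest).getD i false
        && (i == 0 || !((List.replicate (k'+1) false ++ rest).getD (i-1) false))) = [] := by
    rw [List.filter_eq_nil_iff]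
    intro i hi
    have hi' : i < k' + 1 := List.mem_range.mp hi
    rw [flqr_getD_left (k'+1) false rest i (by omega)]
    simp
  rw [hA, List.nil_append]
  congr 1
  apply List.filter_congr
  intro j hj
  simp only [Function.comp_apply]
  rcases j with _ | j'
  · have e1 := flqr_getD_right (k'+1) false rest 0
    simp only [Nat.add_zero] at e1 ⊢
    rw [show k'+1-1 = k' from rfl, e1, flqr_getD_left (k'+1) false rest k' (by omega)]
    simp
  · have e1 := flqr_getD_right (k'+1) false rest (j'+1)
    rw [show k'+1+(j'+1)-1 = k'+1+j' by omega, e1, flqr_getD_right (k'+1) false rest j',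
      beq_eq_false_iff_ne.mpr (by omega : k'+1+(j'+1) ≠ 0),
      beq_eq_false_iff_ne.mpr (by omega : j'+1 ≠ 0)]
    simp

lemma flqrEnds_false (k : Nat) (rest : List Bool) (hk : 0 < k) :
    flqrEnds (List.replicate k false ++ rest) = (flqrEnds rest).map (k + ·) := by
  obtain ⟨k', rfl⟩ : ∃ k', k = k' + 1 := ⟨k - 1, by omega⟩
  unfold flqrEnds
  rw [show (List.replicate (k'+1) false ++ rest).length = (k'+1) + rest.length by simp,
    show (k'+1) + rest.length - 1 = k' + rest.length by omega,
    List.range_add, List.filter_append, List.filter_map]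
  have hA : (List.range (k'+1)).filter
      (fun i => (List.replicate (k'+1) false ++ rest).getD i false
        && (i == k' + rest.length || !((List.replicate (k'+1) false ++ rest).getD (i+1) false))) = [] := by
    rw [List.filter_eq_nil_iff]
    intro i hi
    have hi' : i < k' + 1 := List.mem_range.mp hi
    rw [flqr_getD_left (k'+1) false rest i (by omega)]
    simp
  rw [hA, List.nil_append]
  congr 1
  apply List.filter_congr
  intro j hj
  have hjL : j < rest.length := List.mem_range.mp hj
  simp only [Function.comp_apply]
  have e1 := flqr_getD_right (k'+1) false rest (j+1)
  rw [show k'+1+j+1 = k'+1+(j+1) by omega, e1, flqr_getD_right (k'+1) false rest j]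
  by_cases hj0 : j = rest.length - 1
  · rw [beq_iff_eq.mpr (by omega : k'+1+j = k' + rest.length),
      beq_iff_eq.mpr (by omega : j = rest.length - 1)]
  · rw [beq_eq_false_iff_ne.mpr (by omega : k'+1+j ≠ k' + rest.length),
      beq_eq_false_iff_ne.mpr (by omega : j ≠ rest.length - 1)]

lemma flqrOut_cons (m i : Int) (p : Nat × Nat) (ps : List (Nat × Nat)) :
    flqrOut m i (p :: ps)
    = (if ((p.2 : Int) - (p.1 : Int) + 1 ≥ m) then [(i + (p.1 : Int), i + (p.2 : Int))] else [])
      ++ flqrOut m i ps := by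
  unfold flqrOut
  by_cases hc : ((p.2 : Int) - (p.1 : Int) + 1 ≥ m) <;> simp [hc]

lemma flqrOut_shift (m i : Int) (k : Nat) (ps : List (Nat × Nat)) :
    flqrOut m i (ps.map (Prod.map (k + ·) (k + ·))) = flqrOut m (i + (k : Int)) ps := by
  unfold flqrOut
  rw [List.filter_map, List.map_map]
  have hfil : (ps.filter ((fun p : Nat × Nat => decide ((p.2 : Int) - (p.1 : Int) + 1 ≥ m)) ∘ Prod.map (k + ·) (k + ·)))
      = ps.filter (fun p : Nat × Nat => decide ((p.2 : Int) - (p.1 : Int) + 1 ≥ m)) := by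
    apply List.filter_congr
    intro p _
    simp only [Function.comp_apply, Prod.map_fst, Prod.map_snd, decide_eq_decide]
    push_cast
    omega
  rw [hfil]
  apply List.map_congr_left
  intro p _
  cases p with
  | mk a b =>
    simp only [Function.comp_apply, Prod.map]
    exact Prod.ext (by push_cast; ring) (by push_cast; ring)

lemma flqrBMain (t m : Int) : ∀ (n : Nat) (qs : List Int), qs.length ≤ n → ∀ (i : Int),
    flqrOut m i ((flqrStarts (flqrMask t qs)).zip (flqrEnds (flqrMask t qs)))
    = flqrEmit m i (flqrGroups t qs) := by
  intro n
  induction n with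
  | zero =>
    intro qs hq i
    have : qs = [] := List.length_eq_zero_iff.mp (Nat.le_zero.mp hq)
    subst this
    simp [flqrMask, flqrStarts, flqrEnds, flqrGroups, flqrEmit, flqrOut]
  | succ n ih =>
    intro qs hq i
    match qs with
    | [] => simp [flqrMask, flqrStarts, flqrEnds, flqrGroups, flqrEmit, flqrOut]
    | x :: xs =>
      have hpx : (fun s => decide (s < t) == decide (x < t)) x = true := by simp
      have hsplit : List.takeWhile (fun s => decide (s < t) == decide (x < t)) (x :: xs)
          ++ List.dropWhile (fun s => decide (s < t) == decide (x < t)) (x :: xs) = x :: xs :=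
        List.takeWhile_append_dropWhile
      have hrestlen : (List.dropWhile (fun s => decide (s < t) == decide (x < t)) (x :: xs)).length ≤ n := by
        have hdrop : List.dropWhile (fun s => decide (s < t) == decide (x < t)) (x :: xs)
            = List.dropWhile (fun s => decide (s < t) == decide (x < t)) xs := by
          simp
        rw [hdrop]
        exact le_trans (List.length_dropWhile_le _ _) (Nat.le_of_succ_le_succ hq)
      set p : Int → Bool := fun s => decide (s < t) == decide (x < t) with hp
      set run := List.takeWhile p (x :: xs) with hrun
      set rest := List.dropWhile p (x :: xs) with hrest
      have hgroups : flqrGroups t (x :: xs) = (decide (x < t), run.length) :: flqrGroups t rest := by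
        rw [flqrGroups]
      have hrunpos : 0 < run.length := by
        rw [hrun, List.takeWhile_cons_of_pos hpx]; simp
      have hmaskrun : flqrMask t run = List.replicate run.length (decide (x < t)) := by
        apply List.eq_replicate_iff.mpr
        refine ⟨by simp [flqrMask], ?_⟩
        intro c hc
        obtain ⟨s, hs, rfl⟩ := List.mem_map.mp hc
        have := List.mem_takeWhile_imp hs
        exact beq_iff_eq.mp this
      have hmasksplit : flqrMask t (x :: xs)
          = List.replicate run.length (decide (x < t)) ++ flqrMask t rest := by
        rw [← hmaskrun]
        simp only [flqrMask]
        rw [← List.map_append, hsplit]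
      have hheadF : x < t → (flqrMask t rest).getD 0 false = false := by
        intro hxt
        match hr : rest with
        | [] => simp [flqrMask]
        | y :: ys =>
          have hpy : p y = false := flqr_dropWhile_head_false p _ y ys hrest.symm
          simp [hp, hxt] at hpy
          simp [flqrMask, hpy]
      by_cases hk : x < t
      · have hmr : flqrMask t (x :: xs)
            = List.replicate run.length true ++ flqrMask t rest := by
          rw [hmasksplit]
          congr 1
          simp [hk]
        rw [hmr, flqrStarts_true run.length _ hrunpos (hheadF hk),
          flqrEnds_true run.length _ hrunpos (hheadF hk), List.zip_cons_cons, List.zip_map,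
          flqrOut_cons, flqrOut_shift, ih rest hrestlen (i + (run.length : Int)), hgroups]
        simp only [flqrEmit]
        congr 1
        by_cases hm : (run.length : Int) ≥ m
        · rw [if_pos (by push_cast [Nat.cast_sub hrunpos]; omega),
            if_pos (by simp [hk]; omega)]
          have hcastk : ((run.length - 1 : Nat) : Int) = (run.length : Int) - 1 := by omega
          simp [hcastk, Prod.ext_iff]
          omega
        · rw [if_neg (by push_cast [Nat.cast_sub hrunpos]; omega),
            if_neg (by simp [hk]; omega)]
      · have hmr : flqrMask t (x :: xs)
            = List.replicate run.length false ++ flqrMask t rest := by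
          rw [hmasksplit]
          congr 1
          simp [hk]
        rw [hmr, flqrStarts_false run.length _ hrunpos, flqrEnds_false run.length _ hrunpos,
          List.zip_map, flqrOut_shift, ih rest hrestlen (i + (run.length : Int)), hgroups]
        simp [flqrEmit, hk]

-- ===== VERDICT (by name: the statement is the Claim_ definition above) =====
theorem find_low_quality_regions_spec : Claim_equal_find_low_quality_regions := by
  intro qs t m _
  unfold Spec_find_low_quality_regions find_low_quality_regions find_low_quality_regions_alt
  have hA := flqrMain t m qs.length qs (le_refl _) 0 [] 0
  have hB := flqrBMain t m qs.length qs (le_refl _) 0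
  simp only [List.nil_append, zero_add] at hA
  rw [hA, ← hB]
  unfold flqrOut
  simp
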